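-- pv_equiv track=rewrite | github.com/DarthAkiraNihil/AricoGui | arico/arico.py | _build_distribution
-- ===== SOURCE A (Python) =====
-- def _build_distribution(counts):
--     keys = list(counts.keys())
--
--     distribution = dict()
--     for idx, k in enumerate(keys):
--         if idx == 0:
--             distribution[k] = (0, counts[k])
--         else:
--             previous = keys[idx - 1]
--             distribution[k] = (
--                 distribution[previous][1],
--                 distribution[previous][1] + counts[k]
--             )
--
--     return distribution, keys
-- ===== SOURCE B (Python) =====
-- def _build_distribution(counts):
--     keys = list(counts.keys())
--     total = sum(counts.values())
--     rev = []
--     for k in reversed(keys):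
--         rev.append((k, (total - counts[k], total)))
--         total -= counts[k]
--     return dict(reversed(rev)), keys
-- ===== Notes on version B (the rewrite author's own statement) =====
-- stated objective: alternative
-- what changed: Instead of A's forward pass that accumulates a running prefix sum (reading the previous interval's end out of the dict under construction), B computes the grand total once and builds the intervals back-to-front over reversed(keys), deriving each interval by subtraction as (total - counts[k], total), then reverses the built list into the dict.
import Mathlib
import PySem

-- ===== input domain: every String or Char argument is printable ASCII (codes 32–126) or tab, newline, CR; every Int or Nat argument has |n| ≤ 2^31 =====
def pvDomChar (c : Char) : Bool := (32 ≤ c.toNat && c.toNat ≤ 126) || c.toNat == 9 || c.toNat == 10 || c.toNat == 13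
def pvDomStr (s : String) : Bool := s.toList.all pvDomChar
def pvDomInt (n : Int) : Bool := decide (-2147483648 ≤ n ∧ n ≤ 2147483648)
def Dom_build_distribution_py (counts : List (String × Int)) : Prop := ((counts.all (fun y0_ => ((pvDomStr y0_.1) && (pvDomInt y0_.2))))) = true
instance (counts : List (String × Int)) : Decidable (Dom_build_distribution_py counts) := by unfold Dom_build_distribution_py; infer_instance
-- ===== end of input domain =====

-- B builds the distribution back-to-front: it computes the grand total once, walks the keys in
-- reverse deriving each interval by subtraction as (total - counts[k], total), then reverses the
-- built list; A's forward running-sum pass disappears. Same O(n) cost, a different traversal.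

-- ===== PORT A =====
def build_distribution_py (counts : List (String × Int)) : (List (String × Int × Int)) × List String :=
  let cd := PySem.Dict.mk counts
  let keys := cd.keys
  let dist := (PySem.List.enumerate keys).foldl
    (fun (d : PySem.Dict String (Int × Int)) p =>
      if p.1 == 0 then
        d.insert p.2 (0, cd.getD p.2 0)                        -- counts[k]: k is a key of counts, lookup always succeeds, so getD is exact
      else
        let previous := PySem.List.pyGetD keys (p.1 - 1) ""    -- keys[idx-1]: idx ≥ 1, index always in range, so getD is exact
        let pe := (d.getD previous (0, 0)).2                   -- distribution[previous][1]: previous was inserted already, so getD is exact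
        d.insert p.2 (pe, pe + cd.getD p.2 0))
    PySem.Dict.empty
  (dist.items, keys)

-- ===== PORT B =====
def build_distribution_py_alt (counts : List (String × Int)) : (List (String × Int × Int)) × List String :=
  let cd := PySem.Dict.mk counts
  let keys := cd.keys
  let total := cd.values.foldl (fun a v => a + v) 0
  let rev := (keys.reverse.foldl
    (fun (st : List (String × Int × Int) × Int) k =>
      (st.1 ++ [(k, (st.2 - cd.getD k 0, st.2))], st.2 - cd.getD k 0))   -- counts[k]: key of counts, so getD is exact
    ([], total)).1
  ((PySem.Dict.mk rev.reverse).items, keys)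

-- ===== PRECONDITION & SPEC =====
-- Pre_ excludes association lists with duplicate keys: they do not represent a Python dict
-- (counts IS a dict in the source), so A's overwrite-in-place behaviour there is accidental.
def Pre_build_distribution_py (counts : List (String × Int)) : Prop :=
  (counts.map Prod.fst).Nodup
instance (counts : List (String × Int)) : Decidable (Pre_build_distribution_py counts) := by
  unfold Pre_build_distribution_py; infer_instance
def pvWitness_build_distribution_py : (List (String × Int)) := [("a", 2), ("b", 3)]

def Spec_build_distribution_py (counts : List (String × Int)) (out : (List (String × Int × Int)) × List String) : Prop := out = build_distribution_py_alt counts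
instance (counts : List (String × Int)) (out : (List (String × Int × Int)) × List String) : Decidable (Spec_build_distribution_py counts out) := by unfold Spec_build_distribution_py; infer_instance

-- ===== CLAIM (what is proved, stated in full; the proofs are below) =====
def Claim_equal_build_distribution_py : Prop := ∀ (counts : List (String × Int)), Dom_build_distribution_py counts → Pre_build_distribution_py counts → Spec_build_distribution_py counts (build_distribution_py counts)

-- ===== LEMMAS AND PROOFS =====

-- the common intended result: key k with its cumulative interval, threading the running total t
def pvTarget (t : Int) : List (String × Int) → List (String × (Int × Int))
  | [] => []
  | (k, v) :: rest => (k, (t, t + v)) :: pvTarget (t + v) rest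

theorem pvTarget_map_fst (t : Int) (c : List (String × Int)) :
    (pvTarget t c).map Prod.fst = c.map Prod.fst := by
  induction c generalizing t with
  | nil => rfl
  | cons p rest ih => cases p; simp [pvTarget, ih]

theorem pvTarget_append_singleton (t : Int) (xs : List (String × Int)) (k : String) (v : Int) :
    pvTarget t (xs ++ [(k, v)]) =
      pvTarget t xs ++ [(k, (t + (xs.map Prod.snd).sum, t + (xs.map Prod.snd).sum + v))] := by
  induction xs generalizing t with
  | nil => simp [pvTarget]
  | cons p rest ih =>
    cases p with
    | mk k' v' =>
      simp only [List.cons_append, pvTarget, ih, List.map_cons, List.sum_cons]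
      ring_nf

-- B's backward loop, stated over the raw pairs: starting from t + sum, subtracting the counts in
-- reverse order builds pvTarget's reverse and ends at t
theorem pvRevLoop (c : List (String × Int)) (t : Int) (acc : List (String × Int × Int)) :
    c.reverse.foldl
      (fun (st : List (String × Int × Int) × Int) p =>
        (st.1 ++ [(p.1, (st.2 - p.2, st.2))], st.2 - p.2))
      (acc, t + (c.map Prod.snd).sum)
    = (acc ++ (pvTarget t c).reverse, t) := by
  induction c generalizing t acc with
  | nil => simp [pvTarget]
  | cons p rest ih =>
    cases p with
    | mk k v =>
      have hsum : t + ((((k, v) :: rest).map Prod.snd)).sum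
          = (t + v) + ((rest.map Prod.snd)).sum := by simp; ring
      rw [List.reverse_cons, List.foldl_append, hsum, ih (t + v) acc]
      simp [pvTarget]

-- A's loop, after m steps, has built exactly the dict of the first m intervals
theorem pvAfold (counts : List (String × Int)) (h : (counts.map Prod.fst).Nodup)
    (m : Nat) (hm : m ≤ counts.length) :
    ((PySem.List.enumerate ((counts.map Prod.fst).take m)).foldl
      (fun (d : PySem.Dict String (Int × Int)) p =>
        if p.1 == 0 then
          d.insert p.2 (0, (PySem.Dict.mk counts).getD p.2 0)
        else
          let previous := PySem.List.pyGetD (counts.map Prod.fst) (p.1 - 1) ""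
          let pe := (d.getD previous (0, 0)).2
          d.insert p.2 (pe, pe + (PySem.Dict.mk counts).getD p.2 0))
      PySem.Dict.empty)
    = PySem.Dict.mk (pvTarget 0 (counts.take m)) := by
  induction m with
  | zero => rfl
  | succ m ih =>
    have hlt : m < counts.length := hm
    have hklen : (counts.map Prod.fst).length = counts.length := by simp
    have htake : (counts.map Prod.fst).take (m + 1)
        = (counts.map Prod.fst).take m ++ [(counts.map Prod.fst)[m]'(by omega)] := by
      rw [List.take_add_one, List.getElem?_eq_getElem (by omega)]; rfl
    have hctake : counts.take (m + 1) = counts.take m ++ [counts[m]'hlt] := by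
      rw [List.take_add_one, List.getElem?_eq_getElem hlt]; rfl
    have hlen_take : ((counts.map Prod.fst).take m).length = m := by simp; omega
    rw [htake, PySem.List.enumerate_append, List.foldl_append, ih (by omega),
      hlen_take, PySem.List.enumerate_cons, PySem.List.enumerate_nil]
    simp only [List.foldl_cons, List.foldl_nil, List.getElem_map, zero_add]
    have hgetc : ∀ (j : Nat) (hj : j < counts.length),
        (PySem.Dict.mk counts).getD (counts[j]'hj).1 0 = (counts[j]'hj).2 := by
      intro j hj
      exact PySem.Dict.getD_of_mem_items _ (List.getElem_mem hj) h 0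
    cases m with
    | zero =>
      simp only [Nat.cast_zero, beq_self_eq_true, if_true]
      apply PySem.Dict.ext
      rw [show (PySem.Dict.mk (pvTarget 0 (List.take 0 counts))) = PySem.Dict.empty from rfl,
        PySem.Dict.items_insert_of_not_contains _ _ (PySem.Dict.contains_empty _)]
      simp [hctake, pvTarget, hgetc 0 hlt, PySem.Dict.empty]
    | succ n =>
      have hne : ¬ ((((n : Nat) + 1 : Nat) : Int) == 0) = true := by
        simp; omega
      rw [if_neg hne]
      have hidx : (((n + 1 : Nat) : Int) - 1) = ((n : Nat) : Int) := by push_cast; ring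
      rw [hidx, PySem.List.pyGetD_natCast, List.getD_eq_getElem _ _ (by omega),
        List.getElem_map]
      -- the dict after n+1 steps, split at its last entry
      have hsplitc : counts.take (n + 1) = counts.take n ++ [counts[n]'(by omega)] := by
        rw [List.take_add_one, List.getElem?_eq_getElem (by omega)]; rfl
      have hsplit : pvTarget 0 (counts.take (n + 1))
          = pvTarget 0 (counts.take n)
            ++ [((counts[n]'(by omega)).1,
                 (0 + ((counts.take n).map Prod.snd).sum,
                  0 + ((counts.take n).map Prod.snd).sum + (counts[n]'(by omega)).2))] := by
        rw [hsplitc, pvTarget_append_singleton]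
      have hnodup_take : ∀ (j : Nat), ((counts.map Prod.fst).take j).Nodup :=
        fun j => (List.take_sublist _ _).nodup h
      have hkeys_target : ∀ (j : Nat), (PySem.Dict.mk (pvTarget 0 (counts.take j))).keys
          = (counts.map Prod.fst).take j := by
        intro j
        show (pvTarget 0 (counts.take j)).map Prod.fst = _
        rw [pvTarget_map_fst, List.map_take]
      have hpe : (PySem.Dict.mk (pvTarget 0 (counts.take (n + 1)))).getD
            ((counts[n]'(by omega)).1) (0, 0)
          = (0 + ((counts.take n).map Prod.snd).sum,
             0 + ((counts.take n).map Prod.snd).sum + (counts[n]'(by omega)).2) := by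
        apply PySem.Dict.getD_of_mem_items
        · rw [hsplit]; simp
        · rw [hkeys_target]; exact hnodup_take _
      rw [hpe]
      have hfresh : (PySem.Dict.mk (pvTarget 0 (counts.take (n + 1)))).contains
          ((counts[n + 1]'hlt).1) = false := by
        rw [PySem.Dict.contains_eq_decide_mem_keys, hkeys_target, decide_eq_false_iff_not]
        intro hmem
        rw [List.mem_take_iff_getElem] at hmem
        obtain ⟨i, hi, he⟩ := hmem
        rw [show (counts[n + 1]'hlt).1 = (counts.map Prod.fst)[n + 1]'(by omega) from
          (List.getElem_map _).symm] at he
        have := List.Nodup.getElem_inj_iff h |>.mp he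
        omega
      apply PySem.Dict.ext
      rw [PySem.Dict.items_insert_of_not_contains _ _ hfresh]
      show pvTarget 0 (counts.take (n + 1)) ++ _ = (pvTarget 0 (counts.take (n + 1 + 1)))
      rw [hctake, pvTarget_append_singleton, hgetc (n + 1) (by omega)]
      have hS : ((counts.map Prod.snd).take (n + 1)).sum
          = ((counts.map Prod.snd).take n).sum + (counts[n]'(by omega)).2 := by
        rw [List.take_add_one, List.getElem?_eq_getElem (by simp; omega)]
        simp
      congr 1
      simp only [List.map_take, hS]
      simp [add_assoc]

-- B builds the same list of intervals
theorem pvBalt (counts : List (String × Int)) (h : (counts.map Prod.fst).Nodup) :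
    build_distribution_py_alt counts = (pvTarget 0 counts, counts.map Prod.fst) := by
  have hB : build_distribution_py_alt counts
      = ((PySem.Dict.mk
            (((counts.map Prod.fst).reverse.foldl
              (fun (st : List (String × Int × Int) × Int) k =>
                (st.1 ++ [(k, (st.2 - (PySem.Dict.mk counts).getD k 0, st.2))],
                 st.2 - (PySem.Dict.mk counts).getD k 0))
              ([], (counts.map Prod.snd).foldl (fun a v => a + v) 0)).1.reverse)).items,
        counts.map Prod.fst) := rfl
  -- replace the dict lookups by the paired value and fold over the raw pairs
  have hmapped : (counts.map Prod.fst).reverse.foldl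
      (fun (st : List (String × Int × Int) × Int) k =>
        (st.1 ++ [(k, (st.2 - (PySem.Dict.mk counts).getD k 0, st.2))],
         st.2 - (PySem.Dict.mk counts).getD k 0))
      ([], (counts.map Prod.snd).foldl (fun a v => a + v) 0)
    = counts.reverse.foldl
      (fun (st : List (String × Int × Int) × Int) p =>
        (st.1 ++ [(p.1, (st.2 - p.2, st.2))], st.2 - p.2))
      ([], 0 + (counts.map Prod.snd).sum) := by
    have hsum : (counts.map Prod.snd).foldl (fun a v => a + v) 0
        = 0 + (counts.map Prod.snd).sum := by
      rw [List.sum_eq_foldl]; simp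
    rw [hsum, show (counts.map Prod.fst).reverse = counts.reverse.map Prod.fst by
      rw [List.map_reverse], List.foldl_map]
    apply PySem.List.foldl_congr_mem
    intro acc p hp
    have : (PySem.Dict.mk counts).getD p.1 0 = p.2 :=
      PySem.Dict.getD_of_mem_items _ (List.mem_reverse.mp hp) h 0
    rw [this]
  rw [hB, hmapped, pvRevLoop counts 0 []]
  simp only [List.nil_append, List.reverse_reverse]

theorem build_distribution_py_spec : Claim_equal_build_distribution_py := by
  intro counts _dom hpre
  show build_distribution_py counts = build_distribution_py_alt counts
  have hA : build_distribution_py counts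
      = (((PySem.List.enumerate (counts.map Prod.fst)).foldl
          (fun (d : PySem.Dict String (Int × Int)) p =>
            if p.1 == 0 then
              d.insert p.2 (0, (PySem.Dict.mk counts).getD p.2 0)
            else
              let previous := PySem.List.pyGetD (counts.map Prod.fst) (p.1 - 1) ""
              let pe := (d.getD previous (0, 0)).2
              d.insert p.2 (pe, pe + (PySem.Dict.mk counts).getD p.2 0))
          PySem.Dict.empty).items, counts.map Prod.fst) := rfl
  have h1 := pvAfold counts hpre counts.length (le_refl _)
  rw [List.take_of_length_le (by simp), List.take_length] at h1
  rw [hA, h1, pvBalt counts hpre]
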